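-- pv_equiv track=rewrite | github.com/samipdevkota10/X-Tern-Agents | backend/app/governance/trism.py | _check_rationale
-- ===== SOURCE A (Python) =====
-- def _check_rationale(
--
--     logs: list[dict],
--     findings: list[str]
-- ) -> bool:
--     """Check if all critical agents provided rationale."""
--     critical_agents = ["scenario_generator", "tradeoff_scoring"]
--
--     for agent in critical_agents:
--         agent_logs = [l for l in logs if l.get("agent_name") == agent]
--         if agent_logs:
--             has_rationale = any(
--                 l.get("rationale") and len(str(l["rationale"])) > 10
--                 for l in agent_logs
--             )
--             if not has_rationale:
--                 findings.append(f"Critical agent '{agent}' did not provide rationale")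
--                 return False
--
--     return True
-- ===== SOURCE B (Python) =====
-- def _check_rationale(
--     logs: list[dict],
--     findings: list[str]
-- ) -> bool:
--     """Check if all critical agents provided rationale."""
--     critical_agents = ["scenario_generator", "tradeoff_scoring"]
--
--     # One pass over logs: agent_name -> "has a qualifying rationale so far".
--     status = {}
--     for l in logs:
--         name = l.get("agent_name")
--         if name in critical_agents:
--             r = l.get("rationale")
--             ok = bool(r) and len(str(r)) > 10
--             status[name] = status.get(name, False) or ok
--
--     for agent in critical_agents:
--         if agent in status and not status[agent]:
--             findings.append(f"Critical agent '{agent}' did not provide rationale")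
--             return False
--     return True
-- ===== Notes on version B (the rewrite author's own statement) =====
-- stated objective: alternative
-- what changed: Replaces A's per-agent filter+any scans over logs with a single pass building a dict agent_name -> has-qualifying-rationale, then a small lookup loop over the critical agents.
import Mathlib
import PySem

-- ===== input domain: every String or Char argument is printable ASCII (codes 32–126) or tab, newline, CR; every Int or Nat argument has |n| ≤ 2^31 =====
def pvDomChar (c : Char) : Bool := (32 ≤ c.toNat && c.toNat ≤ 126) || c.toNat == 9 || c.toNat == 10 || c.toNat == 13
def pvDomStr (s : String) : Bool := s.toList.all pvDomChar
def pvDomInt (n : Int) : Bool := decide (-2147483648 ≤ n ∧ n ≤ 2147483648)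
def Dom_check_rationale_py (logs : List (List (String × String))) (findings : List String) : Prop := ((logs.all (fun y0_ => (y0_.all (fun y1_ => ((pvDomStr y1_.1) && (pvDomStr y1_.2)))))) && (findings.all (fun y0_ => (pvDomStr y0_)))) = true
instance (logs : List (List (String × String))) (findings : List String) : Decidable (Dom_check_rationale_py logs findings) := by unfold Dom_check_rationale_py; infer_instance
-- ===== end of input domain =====

-- B replaces A's per-agent filter+any scans with one dict-building pass over logs plus a lookup loop.
-- A mutates `findings` (appends the finding string); B performs the same mutation; only the return value is proved here.

-- ===== PORT A =====
-- l.get("rationale") and len(str(l["rationale"])) > 10  (values are strings, so str(.) is the identity)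
def rationaleOK (l : List (String × String)) : Bool :=
  match PySem.Dict.get? (PySem.Dict.mk l) "rationale" with
  | some v => (v != "") && decide (PySem.Str.len v > 10)
  | none => false

def criticalAgents : List String := ["scenario_generator", "tradeoff_scoring"]

-- the for-loop over critical_agents
def goA (logs : List (List (String × String))) : List String → Bool
  | [] => true
  | agent :: rest =>
    let agent_logs := logs.filter (fun l => PySem.Dict.get? (PySem.Dict.mk l) "agent_name" == some agent)
    if agent_logs.isEmpty then goA logs rest
    else if agent_logs.any rationaleOK then goA logs rest
    else false

def check_rationale_py (logs : List (List (String × String))) (findings : List String) : Bool :=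
  goA logs criticalAgents

-- ===== PORT B =====
-- single pass: agent_name -> "has a qualifying rationale so far"
def stepB (d : PySem.Dict String Bool) (l : List (String × String)) : PySem.Dict String Bool :=
  match PySem.Dict.get? (PySem.Dict.mk l) "agent_name" with
  | some name =>
    if criticalAgents.contains name then
      d.insert name (d.getD name false || rationaleOK l)
    else d
  | none => d

-- the lookup loop over critical_agents
def goB (status : PySem.Dict String Bool) : List String → Bool
  | [] => true
  | agent :: rest =>
    match status.get? agent with
    | some ok => if ok then goB status rest else false
    | none => goB status rest

def check_rationale_py_alt (logs : List (List (String × String))) (findings : List String) : Bool :=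
  goB (logs.foldl stepB PySem.Dict.empty) criticalAgents

-- ===== PRECONDITION & SPEC =====
def Spec_check_rationale_py (logs : List (List (String × String))) (findings : List String) (out : Bool) : Prop := out = check_rationale_py_alt logs findings
instance (logs : List (List (String × String))) (findings : List String) (out : Bool) : Decidable (Spec_check_rationale_py logs findings out) := by unfold Spec_check_rationale_py; infer_instance

-- ===== CLAIM (what is proved, stated in full; the proofs are below) =====
def Claim_equal_check_rationale_py : Prop := ∀ (logs : List (List (String × String))) (findings : List String), Dom_check_rationale_py logs findings → Spec_check_rationale_py logs findings (check_rationale_py logs findings)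

-- ===== LEMMAS AND PROOFS =====

def nameIs (a : String) (l : List (String × String)) : Bool :=
  PySem.Dict.get? (PySem.Dict.mk l) "agent_name" == some a

-- Invariant of B's building pass: what the status dict says about a critical agent a.
theorem foldl_stepB_get? (logs : List (List (String × String)))
    (d : PySem.Dict String Bool) (a : String) (ha : a ∈ criticalAgents) :
    (logs.foldl stepB d).get? a =
      if (logs.filter (nameIs a)).isEmpty then d.get? a
      else some ((d.getD a false) || (logs.filter (nameIs a)).any rationaleOK) := by
  induction logs generalizing d with
  | nil => simp
  | cons l rest ih =>
    rw [List.foldl_cons, ih (stepB d l), List.filter_cons]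
    by_cases hn : nameIs a l = true
    · have hget : PySem.Dict.get? (PySem.Dict.mk l) "agent_name" = some a := by
        simpa [nameIs] using hn
      have hstep : stepB d l = d.insert a (d.getD a false || rationaleOK l) := by
        simp [stepB, hget, ha]
      rw [hn, if_pos rfl]
      by_cases he : (rest.filter (nameIs a)).isEmpty
      · have hany : rest.any (fun x => nameIs a x && rationaleOK x) = false := by
          rw [List.isEmpty_iff, List.filter_eq_nil_iff] at he
          simp only [List.any_eq_false]
          intro x hx
          simp [he x hx]
        simp [he, hstep, PySem.Dict.get?_insert_self, hany]
      · simp [he, hstep, PySem.Dict.getD_insert_self, Bool.or_assoc]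
    · rw [Bool.not_eq_true] at hn
      have hstep : (stepB d l).get? a = d.get? a ∧ (stepB d l).getD a false = d.getD a false := by
        unfold stepB
        cases hg : PySem.Dict.get? (PySem.Dict.mk l) "agent_name" with
        | none => exact ⟨rfl, rfl⟩
        | some name =>
          by_cases hin : name ∈ criticalAgents
          · have hane : a ≠ name := by
              intro h; subst h
              simp [nameIs, hg] at hn
            simp [hin, PySem.Dict.get?_insert, PySem.Dict.getD_insert, hane]
          · simp [hin]
      simp only [hn, Bool.false_eq_true, if_false, hstep.1, hstep.2]

theorem agent_branch (logs : List (List (String × String))) (a : String)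
    (ha : a ∈ criticalAgents) :
    (logs.foldl stepB PySem.Dict.empty).get? a =
      if (logs.filter (nameIs a)).isEmpty then none
      else some ((logs.filter (nameIs a)).any rationaleOK) := by
  rw [foldl_stepB_get? logs PySem.Dict.empty a ha]
  simp [PySem.Dict.get?_empty, PySem.Dict.getD_empty]

-- ===== VERDICT (by name: the statement is the Claim_ definition above) =====
theorem check_rationale_py_spec : Claim_equal_check_rationale_py := by
  intro logs findings _
  unfold Spec_check_rationale_py check_rationale_py check_rationale_py_alt
  have h1 := agent_branch logs "scenario_generator" (by simp [criticalAgents])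
  have h2 := agent_branch logs "tradeoff_scoring" (by simp [criticalAgents])
  have hp : ∀ a : String,
      (fun l => PySem.Dict.get? (PySem.Dict.mk l) "agent_name" == some a) = nameIs a :=
    fun _ => rfl
  simp only [goA, goB, criticalAgents, hp]
  rw [h1, h2]
  by_cases e1 : (logs.filter (nameIs "scenario_generator")).isEmpty <;>
    by_cases e2 : (logs.filter (nameIs "tradeoff_scoring")).isEmpty <;>
      simp only [e1, e2, if_true, if_false, Bool.false_eq_true]
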